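-- pv_equiv track=rewrite | github.com/mutalyzer/algebra | algebra/simple.py | sol_compare
-- ===== SOURCE A (Python) =====
-- def subsequence(list1, list2):
--     """The length of the longest prefix of list1 in list2."""
--
--     matched = []
--     start = 0
--     for item in list1:
--         if start >= len(list2):
--             return matched
--         try:
--             start = list2.index(item, start) + 1
--         except ValueError:
--             continue
--         matched.append(item)
--     return matched
--
-- def sol_compare(observed1, solutions1, observed2, solutions2):
--     if observed1 == observed2:
--         return "equivalent"
--     # empty paths are a special case, because the empty path is always a
--     # subpath of any path, but not something we are interessed in
--     if solutions1 == [[]] or solutions2 == [[]]: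
--         return "disjoint"
--
--     overlap = []
--     for path1 in solutions1:
--         for path2 in solutions2:
--             matched = subsequence(path1, path2)
--             if len(path1) == len(matched):
--                 return "is_contained"
--
--             if len(matched) > len(overlap):
--                 overlap = matched
--
--             matched = subsequence(path2, path1)
--             if len(path2) == len(matched):
--                 return "contains"
--
--             if len(matched) > len(overlap):
--                 overlap = matched
--
--     if len(overlap) > 0:
--         return "overlap"
--     return "disjoint"
-- ===== SOURCE B (Python) =====
-- from bisect import bisect_left
--
-- def _positions(path):
--     """value -> ascending list of its indices in path."""
--     pos = {}
--     for i, v in enumerate(path):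
--         pos.setdefault(v, []).append(i)
--     return pos
--
-- def _match_len(path, pos, limit):
--     """Length of the greedy subsequence match of path against a list given
--     by its positions index pos and its length limit."""
--     start = 0
--     n = 0
--     for item in path:
--         if start >= limit:
--             return n
--         lst = pos.get(item)
--         if lst is not None:
--             j = bisect_left(lst, start)
--             if j < len(lst):
--                 start = lst[j] + 1
--                 n += 1
--     return n
--
-- def sol_compare(observed1, solutions1, observed2, solutions2):
--     if observed1 == observed2:
--         return "equivalent"
--     if solutions1 == [[]] or solutions2 == [[]]:
--         return "disjoint"
--
--     idx1 = [(p, _positions(p)) for p in solutions1]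
--     idx2 = [(p, _positions(p)) for p in solutions2]
--     overlap = 0
--     for path1, pos1 in idx1:
--         for path2, pos2 in idx2:
--             m = _match_len(path1, pos2, len(path2))
--             if m == len(path1):
--                 return "is_contained"
--             overlap = max(overlap, m)
--             m = _match_len(path2, pos1, len(path1))
--             if m == len(path2):
--                 return "contains"
--             overlap = max(overlap, m)
--     return "overlap" if overlap else "disjoint"
-- ===== Notes on version B (the rewrite author's own statement) =====
-- stated objective: faster
-- what changed: B precomputes, once per path, a value-to-sorted-positions dictionary and replaces each list.index(item, start) linear scan by a bisect next-occurrence lookup, tracking only the overlap length instead of the matched list.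
import Mathlib
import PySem

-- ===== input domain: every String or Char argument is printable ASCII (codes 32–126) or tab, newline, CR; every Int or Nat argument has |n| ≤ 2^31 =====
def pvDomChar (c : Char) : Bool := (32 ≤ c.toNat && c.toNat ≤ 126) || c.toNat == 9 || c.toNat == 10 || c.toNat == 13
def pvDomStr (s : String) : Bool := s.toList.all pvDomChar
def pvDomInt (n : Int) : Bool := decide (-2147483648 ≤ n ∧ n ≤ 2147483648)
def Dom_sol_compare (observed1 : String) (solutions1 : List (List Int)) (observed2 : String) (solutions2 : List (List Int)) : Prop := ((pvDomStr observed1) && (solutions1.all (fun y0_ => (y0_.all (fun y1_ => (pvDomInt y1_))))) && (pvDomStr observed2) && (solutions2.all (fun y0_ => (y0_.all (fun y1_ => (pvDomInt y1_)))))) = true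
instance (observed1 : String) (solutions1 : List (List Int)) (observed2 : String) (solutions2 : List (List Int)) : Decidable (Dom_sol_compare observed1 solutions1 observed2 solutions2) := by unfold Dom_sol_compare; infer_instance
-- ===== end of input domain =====

-- B replaces A's per-item list.index linear scans by a precomputed value→positions
-- dictionary with a bisect next-occurrence lookup (objective: faster).

-- ===== PORT A =====
-- subsequence's loop: state is (start, matched); 'return matched' becomes returning [],
-- the already-matched prefix being the conses made so far. list2.index(item, start) is
-- index? on the drop (absolute index = start + relative).
def subAux : List Int → List Int → Nat → List Int
  | [], _, _ => []
  | item :: rest, l2, start =>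
    if l2.length ≤ start then []
    else
      match PySem.List.index? (l2.drop start) item with
      | none => subAux rest l2 start
      | some k => item :: subAux rest l2 (start + k + 1)

def subsequence (l1 l2 : List Int) : List Int := subAux l1 l2 0

-- inner 'for path2 in solutions2' loop; .inl = early return, .inr = the running overlap
def innerA (p1 : List Int) : List (List Int) → List Int → Sum String (List Int)
  | [], ov => .inr ov
  | p2 :: rest, ov =>
    let m := subsequence p1 p2
    if p1.length = m.length then .inl "is_contained"
    else
      let ov1 := if ov.length < m.length then m else ov
      let m2 := subsequence p2 p1
      if p2.length = m2.length then .inl "contains"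
      else innerA p1 rest (if ov1.length < m2.length then m2 else ov1)

def outerA : List (List Int) → List (List Int) → List Int → Sum String (List Int)
  | [], _, ov => .inr ov
  | p1 :: rest, sols2, ov =>
    match innerA p1 sols2 ov with
    | .inl s => .inl s
    | .inr ov' => outerA rest sols2 ov'

def sol_compare (observed1 : String) (solutions1 : List (List Int)) (observed2 : String) (solutions2 : List (List Int)) : String :=
  if observed1 = observed2 then "equivalent"
  else if solutions1 = [[]] ∨ solutions2 = [[]] then "disjoint"
  else
    match outerA solutions1 solutions2 [] with
    | .inl s => s
    | .inr ov => if 0 < ov.length then "overlap" else "disjoint"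

-- ===== PORT B =====
-- _positions: for i, v in enumerate(path): pos.setdefault(v, []).append(i)  =  modify v [] (· ++ [i])
def positionsB (path : List Int) : PySem.Dict Int (List Int) :=
  (PySem.List.enumerate path 0).foldl (fun d p => d.modify p.2 [] (· ++ [p.1])) PySem.Dict.empty

-- _match_len's loop: bisect_left is PySem.List.bisectLeft; 'if j < len(lst): lst[j]' is lst[j]?
def matchLenB : List Int → PySem.Dict Int (List Int) → Int → Int → Int → Int
  | [], _, _, _, n => n
  | item :: rest, pos, limit, start, n =>
    if limit ≤ start then n
    else
      match pos.get? item with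
      | none => matchLenB rest pos limit start n
      | some lst =>
        match lst[PySem.List.bisectLeft lst start]? with
        | some v => matchLenB rest pos limit (v + 1) (n + 1)
        | none => matchLenB rest pos limit start n

def innerB (p1 : List Int) (d1 : PySem.Dict Int (List Int)) :
    List (List Int × PySem.Dict Int (List Int)) → Int → Sum String Int
  | [], ov => .inr ov
  | (p2, d2) :: rest, ov =>
    let m := matchLenB p1 d2 (p2.length : Int) 0 0
    if m = (p1.length : Int) then .inl "is_contained"
    else
      let ov1 := max ov m
      let m2 := matchLenB p2 d1 (p1.length : Int) 0 0
      if m2 = (p2.length : Int) then .inl "contains"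
      else innerB p1 d1 rest (max ov1 m2)

def outerB : List (List Int × PySem.Dict Int (List Int)) → List (List Int × PySem.Dict Int (List Int)) → Int → Sum String Int
  | [], _, ov => .inr ov
  | (p1, d1) :: rest, idx2, ov =>
    match innerB p1 d1 idx2 ov with
    | .inl s => .inl s
    | .inr ov' => outerB rest idx2 ov'

def sol_compare_alt (observed1 : String) (solutions1 : List (List Int)) (observed2 : String) (solutions2 : List (List Int)) : String :=
  if observed1 = observed2 then "equivalent"
  else if solutions1 = [[]] ∨ solutions2 = [[]] then "disjoint"
  else
    let idx1 := solutions1.map (fun p => (p, positionsB p))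
    let idx2 := solutions2.map (fun p => (p, positionsB p))
    match outerB idx1 idx2 0 with
    | .inl s => s
    | .inr ov => if ov ≠ 0 then "overlap" else "disjoint"

-- ===== PRECONDITION & SPEC =====
def Spec_sol_compare (observed1 : String) (solutions1 : List (List Int)) (observed2 : String) (solutions2 : List (List Int)) (out : String) : Prop := out = sol_compare_alt observed1 solutions1 observed2 solutions2
instance (observed1 : String) (solutions1 : List (List Int)) (observed2 : String) (solutions2 : List (List Int)) (out : String) : Decidable (Spec_sol_compare observed1 solutions1 observed2 solutions2 out) := by unfold Spec_sol_compare; infer_instance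

-- ===== CLAIM (what is proved, stated in full; the proofs are below) =====
def Claim_equal_sol_compare : Prop := ∀ (observed1 : String) (solutions1 : List (List Int)) (observed2 : String) (solutions2 : List (List Int)), Dom_sol_compare observed1 solutions1 observed2 solutions2 → Spec_sol_compare observed1 solutions1 observed2 solutions2 (sol_compare observed1 solutions1 observed2 solutions2)

-- ===== LEMMAS AND PROOFS =====

-- the ascending list of indices (counted from n) at which item occurs
def occFrom (item : Int) : List Int → Int → List Int
  | [], _ => []
  | x :: xs, n => if x = item then n :: occFrom item xs (n + 1) else occFrom item xs (n + 1)

lemma getD_positionsB_aux (item : Int) :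
    ∀ (l : List Int) (s : Int) (d : PySem.Dict Int (List Int)),
    ((PySem.List.enumerate l s).foldl (fun d p => d.modify p.2 [] (· ++ [p.1])) d).getD item []
      = d.getD item [] ++ occFrom item l s := by
  intro l
  induction l with
  | nil => intro s d; simp [PySem.List.enumerate, occFrom]
  | cons x xs ih =>
    intro s d
    rw [PySem.List.enumerate_cons]
    simp only [List.foldl_cons]
    rw [ih]
    by_cases hx : x = item
    · subst hx
      rw [PySem.Dict.getD_modify_self]
      simp [occFrom]
    · rw [PySem.Dict.getD_modify_of_ne _ _ _ (fun h => hx h.symm)]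
      simp [occFrom, hx]

lemma getD_positionsB (path : List Int) (item : Int) :
    (positionsB path).getD item [] = occFrom item path 0 := by
  rw [positionsB, getD_positionsB_aux]
  simp [PySem.Dict.getD_empty]

lemma occFrom_ge (item : Int) : ∀ (l : List Int) (n v : Int), v ∈ occFrom item l n → n ≤ v := by
  intro l
  induction l with
  | nil => simp [occFrom]
  | cons x xs ih =>
    intro n v hv
    simp only [occFrom] at hv
    split at hv
    · rcases List.mem_cons.1 hv with h | h
      · omega
      · have := ih (n+1) v h; omega
    · have := ih (n+1) v hv; omega

lemma occFrom_pairwise (item : Int) : ∀ (l : List Int) (n : Int),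
    (occFrom item l n).Pairwise (· ≤ ·) := by
  intro l
  induction l with
  | nil => simp [occFrom]
  | cons x xs ih =>
    intro n
    simp only [occFrom]
    split
    · exact List.Pairwise.cons (fun v hv => by have := occFrom_ge item xs (n+1) v hv; omega) (ih (n+1))
    · exact ih (n+1)

lemma occFrom_eq_nil_iff (item : Int) : ∀ (l : List Int) (n : Int),
    occFrom item l n = [] ↔ item ∉ l := by
  intro l
  induction l with
  | nil => simp [occFrom]
  | cons x xs ih =>
    intro n
    simp only [occFrom]
    split
    · simp_all
    · rw [ih]; simp_all [eq_comm]

-- bisect_left followed by the bounds check reads the FIRST element ≥ x of a sorted list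
lemma bisect_getElem?_eq_find? (lst : List Int) (x : Int) (h : lst.Pairwise (· ≤ ·)) :
    lst[PySem.List.bisectLeft lst x]? = lst.find? (fun v => decide (x ≤ v)) := by
  obtain ⟨hle, hlt, hge⟩ := PySem.List.bisectLeft_spec lst x h
  set j := PySem.List.bisectLeft lst x with hj
  by_cases hjl : j < lst.length
  · rw [List.getElem?_eq_getElem hjl]
    symm
    apply List.find?_eq_some_iff_getElem.2
    refine ⟨by simpa using hge j hjl le_rfl, j, hjl, rfl, ?_⟩
    intro i hi
    simpa using (hlt i (by omega) hi).not_ge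
  · rw [List.getElem?_eq_none (by omega)]
    symm
    apply List.find?_eq_none.2
    intro v hv
    obtain ⟨i, hil, rfl⟩ := List.mem_iff_getElem.1 hv
    simpa using (hlt i hil (by omega)).not_ge

-- the first occurrence ≥ s (absolute) is index? on the drop (relative), shifted
lemma find?_occFrom (item : Int) : ∀ (l : List Int) (n s : Nat),
    (occFrom item l (n : Int)).find? (fun v => decide ((s : Int) ≤ v))
      = (PySem.List.index? (l.drop (s - n)) item).map (fun k => ((max s n + k : Nat) : Int)) := by
  intro l
  induction l with
  | nil => intro n s; simp [occFrom]
  | cons x xs ih =>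
    intro n s
    have hcast : (n : Int) + 1 = ((n + 1 : Nat) : Int) := by push_cast; ring
    by_cases hx : x = item
    · subst hx
      have e : occFrom x (x :: xs) (n : Int) = (n : Int) :: occFrom x xs ((n : Int) + 1) := by
        simp [occFrom]
      rw [e]
      by_cases hsn : s ≤ n
      · rw [List.find?_cons_of_pos (by simpa using (by exact_mod_cast hsn : (s : Int) ≤ (n : Int)))]
        have h0 : s - n = 0 := by omega
        rw [h0, List.drop_zero]
        rw [PySem.List.index?_cons_self]
        simp [Nat.max_eq_right hsn]
      · rw [List.find?_cons_of_neg (by simpa using (by exact_mod_cast (by omega) : ¬ ((s : Int) ≤ (n : Int))))]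
        rw [hcast, ih (n+1) s]
        have hd : (x :: xs).drop (s - n) = xs.drop (s - (n + 1)) := by
          have h1 : s - n = (s - (n+1)) + 1 := by omega
          rw [h1, List.drop_succ_cons]
        rw [hd]
        have hm : max s (n+1) = max s n := by omega
        rw [hm]
    · have e : occFrom item (x :: xs) (n : Int) = occFrom item xs ((n : Int) + 1) := by
        simp [occFrom, hx]
      rw [e]
      rw [hcast, ih (n+1) s]
      by_cases hsn : n < s
      · have hd : (x :: xs).drop (s - n) = xs.drop (s - (n + 1)) := by
          have h1 : s - n = (s - (n+1)) + 1 := by omega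
          rw [h1, List.drop_succ_cons]
        rw [hd]
        have hm : max s (n+1) = max s n := by omega
        rw [hm]
      · have h0 : s - n = 0 := by omega
        have h0' : s - (n+1) = 0 := by omega
        rw [h0, h0', List.drop_zero, List.drop_zero]
        rw [PySem.List.index?_cons_of_ne xs (fun h => hx h)]
        cases PySem.List.index? xs item with
        | none => simp
        | some k => simp; omega

-- A's matched-list length is B's counter
lemma sub_match (l2 : List Int) : ∀ (l1 : List Int) (start : Nat) (n : Int),
    n + ((subAux l1 l2 start).length : Int)
      = matchLenB l1 (positionsB l2) (l2.length : Int) (start : Int) n := by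
  intro l1
  induction l1 with
  | nil => intro start n; simp [subAux, matchLenB]
  | cons item rest ih =>
    intro start n
    rw [subAux, matchLenB]
    by_cases hg : l2.length ≤ start
    · rw [if_pos hg, if_pos (by exact_mod_cast hg)]
      simp
    · rw [if_neg hg, if_neg (by exact_mod_cast hg)]
      have hocc := getD_positionsB l2 item
      cases hget : (positionsB l2).get? item with
      | none =>
        have hnil : occFrom item l2 0 = [] := by
          rw [← hocc, PySem.Dict.getD_eq_get?_getD, hget]; rfl
        have hnin : item ∉ l2 := (occFrom_eq_nil_iff item l2 0).1 hnil
        have hidx : PySem.List.index? (l2.drop start) item = none :=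
          (PySem.List.index?_eq_none_iff _ _).2 (fun h => hnin (List.mem_of_mem_drop h))
        rw [hidx]
        exact ih start n
      | some lst =>
        have hlst : lst = occFrom item l2 0 := by
          rw [← hocc, PySem.Dict.getD_eq_get?_getD, hget]; rfl
        have hbi : lst[PySem.List.bisectLeft lst (start : Int)]?
            = (PySem.List.index? (l2.drop start) item).map (fun k => ((start + k : Nat) : Int)) := by
          rw [bisect_getElem?_eq_find? lst _ (hlst ▸ occFrom_pairwise item l2 0), hlst]
          have h0 : (0 : Int) = ((0 : Nat) : Int) := rfl
          rw [h0, find?_occFrom item l2 0 start]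
          simp
        dsimp only
        rw [hbi]
        cases hidx : PySem.List.index? (l2.drop start) item with
        | none => simp only [Option.map_none]; exact ih start n
        | some k =>
          simp only [Option.map_some]
          have hc : ((start + k : Nat) : Int) + 1 = ((start + k + 1 : Nat) : Int) := by push_cast; ring
          rw [hc, ← ih (start + k + 1) (n + 1)]
          simp; ring

lemma sub_match0 (l1 l2 : List Int) :
    ((subsequence l1 l2).length : Int) = matchLenB l1 (positionsB l2) (l2.length : Int) 0 0 := by
  have h := sub_match l2 l1 0 0
  simpa [subsequence] using h

def sumF : Sum String (List Int) → Sum String Int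
  | .inl s => .inl s
  | .inr l => .inr (l.length : Int)

lemma innerAB (p1 : List Int) : ∀ (rest : List (List Int)) (ov : List Int),
    innerB p1 (positionsB p1) (rest.map (fun p => (p, positionsB p))) ((ov.length : Int))
      = sumF (innerA p1 rest ov) := by
  intro rest
  induction rest with
  | nil => intro ov; simp [innerA, innerB, sumF]
  | cons p2 rest ih =>
    intro ov
    rw [List.map_cons, innerA, innerB]
    simp only [← sub_match0]
    by_cases h1 : p1.length = (subsequence p1 p2).length
    · rw [if_pos (by exact_mod_cast h1.symm), if_pos h1]
      rfl
    · rw [if_neg (fun h => h1 (by exact_mod_cast h.symm)), if_neg h1]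
      by_cases h2 : p2.length = (subsequence p2 p1).length
      · rw [if_pos (by exact_mod_cast h2.symm), if_pos h2]
        rfl
      · rw [if_neg (fun h => h2 (by exact_mod_cast h.symm)), if_neg h2]
        have e : max (max ((ov.length : Nat) : Int) ((subsequence p1 p2).length : Int)) ((subsequence p2 p1).length : Int)
            = (((if (if ov.length < (subsequence p1 p2).length then subsequence p1 p2 else ov).length < (subsequence p2 p1).length
                then subsequence p2 p1
                else (if ov.length < (subsequence p1 p2).length then subsequence p1 p2 else ov)).length : Nat) : Int) := by
          split_ifs <;> omega
        rw [e, ih]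

lemma outerAB : ∀ (s1 s2 : List (List Int)) (ov : List Int),
    outerB (s1.map (fun p => (p, positionsB p))) (s2.map (fun p => (p, positionsB p))) ((ov.length : Int))
      = sumF (outerA s1 s2 ov) := by
  intro s1
  induction s1 with
  | nil => intro s2 ov; simp [outerA, outerB, sumF]
  | cons p1 rest ih =>
    intro s2 ov
    rw [List.map_cons, outerA, outerB]
    rw [innerAB]
    cases innerA p1 s2 ov with
    | inl s => rfl
    | inr ov' => exact ih s2 ov'

-- ===== VERDICT (by name: the statement is the Claim_ definition above) =====
theorem sol_compare_spec : Claim_equal_sol_compare := by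
  intro observed1 solutions1 observed2 solutions2 _
  unfold Spec_sol_compare sol_compare sol_compare_alt
  by_cases ho : observed1 = observed2
  · rw [if_pos ho, if_pos ho]
  · rw [if_neg ho, if_neg ho]
    by_cases hs : solutions1 = [[]] ∨ solutions2 = [[]]
    · rw [if_pos hs, if_pos hs]
    · rw [if_neg hs, if_neg hs]
      have h := outerAB solutions1 solutions2 []
      simp only [List.length_nil, Nat.cast_zero] at h
      show _ = (match outerB (solutions1.map (fun p => (p, positionsB p))) (solutions2.map (fun p => (p, positionsB p))) 0 with
        | Sum.inl s => s
        | Sum.inr ov => if ov ≠ 0 then "overlap" else "disjoint")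
      rw [h]
      cases outerA solutions1 solutions2 [] with
      | inl s => rfl
      | inr ov =>
        show (if 0 < ov.length then "overlap" else "disjoint")
          = (if ((ov.length : Int)) ≠ 0 then "overlap" else "disjoint")
        by_cases hl : 0 < ov.length
        · rw [if_pos hl, if_pos (by exact_mod_cast Nat.pos_iff_ne_zero.1 hl)]
        · rw [if_neg hl, if_neg (by simp only [ne_eq, not_not]; exact_mod_cast Nat.eq_zero_of_not_pos hl)]
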